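-- pv_equiv track=rewrite | github.com/taylorlowery/mp3splitter | splitter.py | complete_segments
-- ===== SOURCE A (Python) =====
-- from typing import Tuple, List, Any
--
-- def complete_segments(segments: List[Tuple[str, str]], final_time: str) -> List[Tuple[str, str, str]]:
--     new_segments = []
--     for index, segment in enumerate(segments):
--         if index < len(segments) - 1:
--             end_time = segments[index + 1][1]
--         else:
--             end_time = final_time
--         new_segments.append((segment[0], segment[1], end_time))
--     return new_segments
-- ===== SOURCE B (Python) =====
-- def complete_segments(segments, final_time):
--     result = []
--     end = final_time
--     for s in reversed(segments):
--         result.append((s[0], s[1], end))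
--         end = s[1]
--     result.reverse()
--     return result
-- ===== Notes on version B (the rewrite author's own statement) =====
-- stated objective: alternative
-- what changed: Traverses the segments in reverse carrying the next end time as an accumulator (no index lookahead), then reverses the built list, instead of A's indexed forward loop that peeks at segments[index+1].
import Mathlib
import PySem

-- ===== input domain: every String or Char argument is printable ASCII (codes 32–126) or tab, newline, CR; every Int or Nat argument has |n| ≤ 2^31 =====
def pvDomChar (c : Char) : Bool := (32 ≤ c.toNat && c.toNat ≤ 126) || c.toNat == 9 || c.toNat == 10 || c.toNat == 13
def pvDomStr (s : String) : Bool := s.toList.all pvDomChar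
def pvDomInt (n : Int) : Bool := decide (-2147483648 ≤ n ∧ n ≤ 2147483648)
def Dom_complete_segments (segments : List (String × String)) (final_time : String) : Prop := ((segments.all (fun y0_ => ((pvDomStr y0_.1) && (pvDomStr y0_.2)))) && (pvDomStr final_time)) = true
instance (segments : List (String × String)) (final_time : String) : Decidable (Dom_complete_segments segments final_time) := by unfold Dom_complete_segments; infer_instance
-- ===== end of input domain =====

-- B traverses the segments in reverse carrying the next end time as an accumulator, then reverses the result (alternative decomposition; no index lookahead).


-- ===== PORT A =====
def complete_segments (segments : List (String × String)) (final_time : String) : List (String × String × String) :=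
  (PySem.List.enumerate segments).foldl
    (fun new_segments p =>
      let index := p.1
      let segment := p.2
      let end_time :=
        if index < (segments.length : Int) - 1 then
          ((PySem.List.pyGet? segments (index + 1)).getD ("", "")).2  -- in range whenever the branch is taken
        else final_time
      new_segments ++ [(segment.1, segment.2, end_time)]) []

-- ===== PORT B =====
def complete_segments_alt (segments : List (String × String)) (final_time : String) : List (String × String × String) :=
  let st := segments.reverse.foldl
    (fun (acc : List (String × String × String) × String) s =>
      (acc.1 ++ [(s.1, s.2, acc.2)], s.2)) ([], final_time)
  st.1.reverse

-- ===== PRECONDITION & SPEC =====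
def Spec_complete_segments (segments : List (String × String)) (final_time : String) (out : List (String × String × String)) : Prop := out = complete_segments_alt segments final_time
instance (segments : List (String × String)) (final_time : String) (out : List (String × String × String)) : Decidable (Spec_complete_segments segments final_time out) := by unfold Spec_complete_segments; infer_instance

-- ===== CLAIM (what is proved, stated in full; the proofs are below) =====
def Claim_equal_complete_segments : Prop := ∀ (segments : List (String × String)) (final_time : String), Dom_complete_segments segments final_time → Spec_complete_segments segments final_time (complete_segments segments final_time)

-- ===== LEMMAS AND PROOFS =====

-- reference recursion: each segment paired with the next segment's second component (or final_time)
def pvSpecCS : List (String × String) → String → List (String × String × String)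
  | [], _ => []
  | a :: rest, ft => (a.1, a.2, (match rest with | [] => ft | b :: _ => b.2)) :: pvSpecCS rest ft

theorem A_eq_zip (segments : List (String × String)) (final_time : String) :
    complete_segments segments final_time =
      (segments.zip (segments.tail.map Prod.snd ++ [final_time])).map
        (fun p => (p.1.1, p.1.2, p.2)) := by
  unfold complete_segments
  rw [PySem.List.foldl_append_singleton_eq_map]
  apply List.ext_getElem
  · simp [PySem.List.length_enumerate, List.length_zip]
    omega
  · intro k h1 h2
    simp only [List.nil_append, List.getElem_map, List.getElem_zip, PySem.List.getElem_enumerate]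
    refine Prod.ext rfl (Prod.ext rfl ?_)
    simp only
    by_cases hk : k < segments.length - 1
    · rw [if_pos (by omega)]
      have hcast : (0 : Int) + (k : Int) + 1 = ((k + 1 : Nat) : Int) := by push_cast; ring
      rw [hcast, PySem.List.pyGet?_natCast,
        List.getElem?_eq_getElem (by omega : k + 1 < segments.length)]
      rw [List.getElem_append_left (by simpa using hk)]
      simp [List.getElem_tail]
    · rw [if_neg (by omega)]
      rw [List.getElem_append_right (by simpa using hk)]
      simp

theorem zip_eq_spec (segments : List (String × String)) (final_time : String) :
    (segments.zip (segments.tail.map Prod.snd ++ [final_time])).map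
        (fun p => (p.1.1, p.1.2, p.2)) = pvSpecCS segments final_time := by
  induction segments with
  | nil => simp [pvSpecCS]
  | cons a rest ih =>
    cases rest with
    | nil => simp [pvSpecCS]
    | cons b r =>
      simp only [List.tail_cons, List.map_cons, List.cons_append, List.zip_cons_cons,
        List.map_cons, pvSpecCS]
      exact congrArg _ (by simpa using ih)

theorem B_foldr_char (segments : List (String × String)) (final_time : String) :
    segments.foldr
        (fun s (acc : List (String × String × String) × String) =>
          (acc.1 ++ [(s.1, s.2, acc.2)], s.2)) ([], final_time) =
      ((pvSpecCS segments final_time).reverse,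
        (match segments with | [] => final_time | a :: _ => a.2)) := by
  induction segments with
  | nil => simp [pvSpecCS]
  | cons a rest ih => simp [pvSpecCS, ih]

theorem B_eq_spec (segments : List (String × String)) (final_time : String) :
    complete_segments_alt segments final_time = pvSpecCS segments final_time := by
  unfold complete_segments_alt
  rw [List.foldl_reverse, B_foldr_char]
  simp

-- ===== VERDICT (by name: the statement is the Claim_ definition above) =====
theorem complete_segments_spec : Claim_equal_complete_segments := by
  intro segments final_time _
  unfold Spec_complete_segments
  rw [A_eq_zip, zip_eq_spec, B_eq_spec]
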